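-- pv_equiv track=rewrite | github.com/danchanka/lsfusion-tools | confluence/ConfluenceToMarkdown/transform_md.py | remove_myCompany_staff
-- ===== SOURCE A (Python) =====
-- def remove_myCompany_staff(data):
--     lines = data.split('\n')
--     nlines = []
--     for line in lines:
--         if line.startswith('## Attachments:') or line.startswith('### Attachments:'):
--             break
--         if '![](attachments/thumbnails/1146972/1147367)' in line: continue
--         if '![](attachments/thumbnails/1146972/1147365)' in line: continue
--         if '![](attachments/1146972/1147367.png)' in line: continue
--         if '![](attachments/1146972/1147365.png)' in line: continue
--         if '![](plugins/servlet/confluence/placeholder/unknown-attachment)' in line: continue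
--
--         nlines.append(line)
--     return '\n'.join(nlines)
-- ===== SOURCE B (Python) =====
-- _SUBS = (
--     '![](attachments/thumbnails/1146972/1147367)',
--     '![](attachments/thumbnails/1146972/1147365)',
--     '![](attachments/1146972/1147367.png)',
--     '![](attachments/1146972/1147365.png)',
--     '![](plugins/servlet/confluence/placeholder/unknown-attachment)',
-- )
--
-- def remove_myCompany_staff(data):
--     # Phase 1: find the cutoff by SUBSTRING SEARCH on the raw text (no line scan):
--     # the first Attachments header line starts either at position 0 or right after
--     # a newline, so search for the newline-prefixed patterns with str.find.
--     cut = len(data)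
--     if data.startswith('## Attachments:') or data.startswith('### Attachments:'):
--         cut = 0
--     else:
--         for pat in ('\n## Attachments:', '\n### Attachments:'):
--             i = data.find(pat)
--             if i != -1 and i < cut:
--                 cut = i
--     # Phase 2: split the truncated text into lines and drop attachment lines.
--     return '\n'.join(l for l in data[:cut].split('\n')
--                      if not any(s in l for s in _SUBS))
-- ===== Notes on version B (the rewrite author's own statement) =====
-- stated objective: alternative
-- what changed: B finds the cutoff by raw substring search (str.find of the newline-prefixed header patterns, min of the hits, plus a startswith check at position 0) and slices the text there, then splits only the truncated text and filters the five substrings; A scans line by line with break/continue.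
import Mathlib
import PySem

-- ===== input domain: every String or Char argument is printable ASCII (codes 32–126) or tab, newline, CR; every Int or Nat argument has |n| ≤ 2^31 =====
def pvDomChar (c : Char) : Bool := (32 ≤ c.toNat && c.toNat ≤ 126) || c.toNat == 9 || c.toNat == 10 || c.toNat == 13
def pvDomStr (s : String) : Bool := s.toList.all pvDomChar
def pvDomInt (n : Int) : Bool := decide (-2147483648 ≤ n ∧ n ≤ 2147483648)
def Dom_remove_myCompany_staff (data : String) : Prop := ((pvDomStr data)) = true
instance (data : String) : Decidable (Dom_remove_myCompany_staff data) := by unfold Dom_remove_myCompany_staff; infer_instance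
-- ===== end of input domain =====

-- B replaces A's line-by-line scan by a raw substring search for the header cutoff, then slices and filters; return value only (alternative decomposition, no speed claim).

-- ===== PORT A =====
-- A's single loop with break/continue, as structural recursion over the lines
def pvGoA : List String → List String
  | [] => []
  | line :: rest =>
    if PySem.Str.startswith line "## Attachments:" || PySem.Str.startswith line "### Attachments:" then []
    else if PySem.Str.isIn "![](attachments/thumbnails/1146972/1147367)" line then pvGoA rest
    else if PySem.Str.isIn "![](attachments/thumbnails/1146972/1147365)" line then pvGoA rest
    else if PySem.Str.isIn "![](attachments/1146972/1147367.png)" line then pvGoA rest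
    else if PySem.Str.isIn "![](attachments/1146972/1147365.png)" line then pvGoA rest
    else if PySem.Str.isIn "![](plugins/servlet/confluence/placeholder/unknown-attachment)" line then pvGoA rest
    else line :: pvGoA rest

def remove_myCompany_staff (data : String) : String :=
  PySem.Str.join "\n" (pvGoA ((PySem.Str.split? data "\n").getD []))

-- ===== PORT B =====
def pvSubs : List String :=
  [ "![](attachments/thumbnails/1146972/1147367)"
  , "![](attachments/thumbnails/1146972/1147365)"
  , "![](attachments/1146972/1147367.png)"
  , "![](attachments/1146972/1147365.png)"
  , "![](plugins/servlet/confluence/placeholder/unknown-attachment)" ]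

-- Phase 1: cutoff by substring search on the raw text (str.find of the newline-prefixed
-- header patterns, keeping the minimum hit; position 0 checked with startswith).
-- Phase 2: slice, split, filter the five substrings, join.
def remove_myCompany_staff_alt (data : String) : String :=
  let cut : Int :=
    if PySem.Str.startswith data "## Attachments:" || PySem.Str.startswith data "### Attachments:" then 0
    else ["\n## Attachments:", "\n### Attachments:"].foldl
      (fun c pat =>
        let i := PySem.Str.find data pat
        if i ≠ -1 ∧ i < c then i else c)
      (PySem.Str.len data)
  PySem.Str.join "\n"
    (((PySem.Str.split? (PySem.Str.slice data none (some cut)) "\n").getD []).filter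
      (fun l => !pvSubs.any (fun s => PySem.Str.isIn s l)))

-- ===== PRECONDITION & SPEC =====
def Spec_remove_myCompany_staff (data : String) (out : String) : Prop := out = remove_myCompany_staff_alt data
instance (data : String) (out : String) : Decidable (Spec_remove_myCompany_staff data out) := by unfold Spec_remove_myCompany_staff; infer_instance

-- ===== CLAIM (what is proved, stated in full; the proofs are below) =====
def Claim_equal_remove_myCompany_staff : Prop := ∀ (data : String), Dom_remove_myCompany_staff data → Spec_remove_myCompany_staff data (remove_myCompany_staff data)

-- ===== LEMMAS AND PROOFS =====

def pvSplitNl : List Char → List (List Char)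
  | [] => [[]]
  | c :: rest => if c = '\n' then [] :: pvSplitNl rest else (pvSplitNl rest).modifyHead (c :: ·)

theorem pvSplitNl_ne_nil (cs : List Char) : pvSplitNl cs ≠ [] := by
  induction cs with
  | nil => simp [pvSplitNl]
  | cons c rest ih =>
    simp only [pvSplitNl]
    split
    · simp
    · cases h : pvSplitNl rest with
      | nil => exact absurd h ih
      | cons a t => simp [h]

theorem pvGo_spec (fuel : Nat) (cs cur : List Char) (acc : List (List Char)) (h : cs.length < fuel) :
    PySem.Chars.splitOn.go ['\n'] fuel cs cur acc
      = acc.reverse ++ (pvSplitNl cs).modifyHead (cur.reverse ++ ·) := by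
  induction fuel generalizing cs cur acc with
  | zero => omega
  | succ fuel ih =>
    cases cs with
    | nil => simp [PySem.Chars.splitOn.go, pvSplitNl]
    | cons c rest =>
      by_cases hc : c = '\n'
      · subst hc
        rw [show PySem.Chars.splitOn.go ['\n'] (fuel+1) ('\n' :: rest) cur acc
              = PySem.Chars.splitOn.go ['\n'] fuel rest [] (cur.reverse :: acc) by
            simp [PySem.Chars.splitOn.go, List.isPrefixOf]]
        rw [ih rest [] (cur.reverse :: acc) (by simpa using Nat.lt_of_succ_lt_succ h)]
        simp only [pvSplitNl, if_pos rfl]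
        cases pvSplitNl rest <;> simp
      · rw [show PySem.Chars.splitOn.go ['\n'] (fuel+1) (c :: rest) cur acc
              = PySem.Chars.splitOn.go ['\n'] fuel rest (c :: cur) acc by
            simp [PySem.Chars.splitOn.go, List.isPrefixOf, Ne.symm hc]]
        rw [ih rest (c :: cur) acc (by simpa using Nat.lt_of_succ_lt_succ h)]
        simp only [pvSplitNl, if_neg hc]
        cases hsp : pvSplitNl rest with
        | nil => exact absurd hsp (pvSplitNl_ne_nil rest)
        | cons a t => simp [hsp]

theorem pvSplitOn_eq (cs : List Char) : PySem.Chars.splitOn cs ['\n'] = pvSplitNl cs := by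
  rw [PySem.Chars.splitOn, pvGo_spec _ _ _ _ (by omega)]
  cases h : pvSplitNl cs with
  | nil => exact absurd h (pvSplitNl_ne_nil cs)
  | cons a t => simp

-- splitNl of a newline-free list
theorem pvSplitNl_no_nl (cs : List Char) (h : '\n' ∉ cs) : pvSplitNl cs = [cs] := by
  induction cs with
  | nil => rfl
  | cons c rest ih =>
    have hc : c ≠ '\n' := fun hc => h (hc ▸ List.mem_cons_self)
    simp only [pvSplitNl, if_neg hc, ih (fun hm => h (List.mem_cons_of_mem _ hm))]
    rfl

-- splitNl across the first newline
theorem pvSplitNl_append (l0 rest : List Char) (h : '\n' ∉ l0) :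
    pvSplitNl (l0 ++ '\n' :: rest) = l0 :: pvSplitNl rest := by
  induction l0 with
  | nil => simp [pvSplitNl]
  | cons c l0' ih =>
    have hc : c ≠ '\n' := fun hc => h (hc ▸ List.mem_cons_self)
    simp only [List.cons_append, pvSplitNl, if_neg hc,
      ih (fun hm => h (List.mem_cons_of_mem _ hm))]
    rfl

-- the head of splitNl is the first line
theorem pvSplitNl_head (cs : List Char) :
    ∃ t, pvSplitNl cs = (cs.takeWhile (fun c => !(c = '\n' : Bool))) :: t := by
  induction cs with
  | nil => exact ⟨[], rfl⟩
  | cons c rest ih =>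
    by_cases hc : c = '\n'
    · subst hc; exact ⟨pvSplitNl rest, by simp [pvSplitNl, List.takeWhile_cons]⟩
    · obtain ⟨t, ht⟩ := ih
      exact ⟨t, by simp [pvSplitNl, hc, ht, List.takeWhile_cons]⟩

-- a newline-free prefix is a prefix of the first line
theorem pvPrefix_takeWhile (h : List Char) (hn : '\n' ∉ h) (cs : List Char) :
    h <+: cs ↔ h <+: cs.takeWhile (fun c => !(c = '\n' : Bool)) := by
  induction h generalizing cs with
  | nil => simp
  | cons a h' ih =>
    have ha : a ≠ '\n' := fun hc => hn (hc ▸ List.mem_cons_self)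
    cases cs with
    | nil => simp
    | cons c rest =>
      by_cases hc : c = '\n'
      · subst hc
        simp only [List.takeWhile_cons]
        constructor
        · rintro ⟨t, ht⟩
          simp only [List.cons_append, List.cons.injEq] at ht
          exact absurd ht.1 ha
        · intro hp
          simp at hp
      · simp only [List.takeWhile_cons]
        rw [if_pos (by simp [hc])]
        simp only [List.cons_prefix_cons]
        exact and_congr_right fun _ => ih (fun hm => hn (List.mem_cons_of_mem _ hm)) rest

-- a newline-free prefix reaches only into the part before the first newline
theorem pvPrefix_append_nl (h l0 rest : List Char) (hn : '\n' ∉ h) (h0 : '\n' ∉ l0) :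
    h <+: (l0 ++ '\n' :: rest) ↔ h <+: l0 := by
  induction h generalizing l0 with
  | nil => simp
  | cons a h' ih =>
    have ha : a ≠ '\n' := fun hc => hn (hc ▸ List.mem_cons_self)
    cases l0 with
    | nil =>
      simp only [List.nil_append]
      constructor
      · rintro ⟨t, ht⟩
        simp only [List.cons_append, List.cons.injEq] at ht
        exact absurd ht.1 ha
      · intro hp; simp at hp
    | cons c l0' =>
      simp only [List.cons_append, List.cons_prefix_cons]
      exact and_congr_right fun _ =>
        ih l0' (fun hm => hn (List.mem_cons_of_mem _ hm)) (fun hm => h0 (List.mem_cons_of_mem _ hm))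

def pvOcc (cs : List Char) (j : Nat) : Prop :=
  "\n## Attachments:".toList <+: cs.drop j ∨ "\n### Attachments:".toList <+: cs.drop j

def pvIdx : List Char → Nat
  | [] => 0
  | c :: rest =>
    if "\n## Attachments:".toList.isPrefixOf (c :: rest) || "\n### Attachments:".toList.isPrefixOf (c :: rest)
    then 0 else pvIdx rest + 1

theorem pvOcc_lt (cs : List Char) (j : Nat) (h : pvOcc cs j) : j < cs.length := by
  rcases h with h | h <;>
  · have := h.length_le
    by_contra hj
    simp [List.drop_eq_nil_of_le (by omega : cs.length ≤ j)] at this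

theorem pvOcc_succ (c : Char) (rest : List Char) (j : Nat) :
    pvOcc (c :: rest) (j + 1) ↔ pvOcc rest j := by
  simp [pvOcc]

theorem pvOcc_zero (cs : List Char) :
    pvOcc cs 0 ↔ ("\n## Attachments:".toList.isPrefixOf cs || "\n### Attachments:".toList.isPrefixOf cs) = true := by
  simp [pvOcc, List.isPrefixOf_iff_prefix]

theorem pvIdx_min (cs : List Char) (j : Nat) (hj : j < pvIdx cs) : ¬ pvOcc cs j := by
  induction cs generalizing j with
  | nil => simp [pvIdx] at hj
  | cons c rest ih =>
    simp only [pvIdx] at hj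
    by_cases hcond : ("\n## Attachments:".toList.isPrefixOf (c :: rest) || "\n### Attachments:".toList.isPrefixOf (c :: rest)) = true
    · rw [if_pos hcond] at hj; omega
    · rw [if_neg hcond] at hj
      cases j with
      | zero =>
        rw [pvOcc_zero]
        exact hcond
      | succ j' =>
        rw [pvOcc_succ]
        exact ih j' (by omega)

theorem pvIdx_occ (cs : List Char) : pvIdx cs = cs.length ∨ pvOcc cs (pvIdx cs) := by
  induction cs with
  | nil => left; rfl
  | cons c rest ih =>
    simp only [pvIdx]
    by_cases hcond : ("\n## Attachments:".toList.isPrefixOf (c :: rest) || "\n### Attachments:".toList.isPrefixOf (c :: rest)) = true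
    · rw [if_pos hcond]
      right
      rw [pvOcc_zero]
      exact hcond
    · rw [if_neg hcond]
      rcases ih with h | h
      · left; simp [h]
      · right; rw [pvOcc_succ]; exact h

theorem pvIdx_eq_of_first (cs : List Char) (k : Nat) (hk : pvOcc cs k)
    (hmin : ∀ j < k, ¬ pvOcc cs j) : pvIdx cs = k := by
  rcases Nat.lt_trichotomy (pvIdx cs) k with h | h | h
  · rcases pvIdx_occ cs with he | ho
    · have := pvOcc_lt _ _ hk; omega
    · exact absurd ho (hmin _ h)
  · exact h
  · exact absurd hk (pvIdx_min _ _ h)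

theorem pvIdx_eq_len (cs : List Char) (hnone : ∀ j, ¬ pvOcc cs j) : pvIdx cs = cs.length := by
  rcases pvIdx_occ cs with h | h
  · exact h
  · exact absurd h (hnone _)

theorem pvNoNl_no_occ (cs : List Char) (h : '\n' ∉ cs) (j : Nat) : ¬ pvOcc cs j := by
  intro ho
  apply h
  rcases ho with ho | ho <;>
  · have : '\n' ∈ cs.drop j := ho.mem (by simp)
    exact List.mem_of_mem_drop this

-- what Chars.find knows, packaged
theorem pvFindFacts (cs p : List Char) (hp : p ≠ []) :
    (PySem.Chars.find cs p = -1 ∧ ∀ j, ¬ p <+: cs.drop j) ∨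
    (0 ≤ PySem.Chars.find cs p ∧ PySem.Chars.find cs p < (cs.length : Int) ∧
      p <+: cs.drop (PySem.Chars.find cs p).toNat ∧
      ∀ i < (PySem.Chars.find cs p).toNat, ¬ p <+: cs.drop i) := by
  rcases (Int.lt_or_le (PySem.Chars.find cs p) 0).symm with h0 | h0
  · right
    obtain ⟨hpre, hmin⟩ := PySem.Chars.find_spec h0
    refine ⟨h0, ?_, hpre, hmin⟩
    have h1 := hpre.length_le
    have h2 : (PySem.Chars.find cs p).toNat < cs.length := by
      by_contra hj
      rw [List.drop_eq_nil_of_le (by omega : cs.length ≤ (PySem.Chars.find cs p).toNat)] at h1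
      simp only [List.length_nil, Nat.le_zero] at h1
      exact hp (List.eq_nil_of_length_eq_zero h1)
    omega
  · left
    have hne : PySem.Chars.find cs p = -1 := by
      have := PySem.Chars.neg_one_le_find (s := cs) (sub := p)
      omega
    refine ⟨hne, fun j hj => ?_⟩
    have : ∃ j, p <+: cs.drop j := ⟨j, hj⟩
    rw [PySem.Chars.exists_prefix_drop_iff_isIn] at this
    rw [PySem.Chars.find_eq_neg_one_iff, ← PySem.Chars.isIn_iff_infix] at hne
    exact hne this

theorem pvCut_eq (cs : List Char) :
    (if PySem.Chars.find cs "\n### Attachments:".toList ≠ -1 ∧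
        PySem.Chars.find cs "\n### Attachments:".toList <
          (if PySem.Chars.find cs "\n## Attachments:".toList ≠ -1 ∧
              PySem.Chars.find cs "\n## Attachments:".toList < (cs.length : Int)
           then PySem.Chars.find cs "\n## Attachments:".toList else (cs.length : Int))
     then PySem.Chars.find cs "\n### Attachments:".toList
     else (if PySem.Chars.find cs "\n## Attachments:".toList ≠ -1 ∧
              PySem.Chars.find cs "\n## Attachments:".toList < (cs.length : Int)
           then PySem.Chars.find cs "\n## Attachments:".toList else (cs.length : Int)))
    = (pvIdx cs : Int) := by
  rcases pvFindFacts cs "\n## Attachments:".toList (by decide) with ⟨h1e, h1n⟩ | ⟨h1a, h1b, h1p, h1m⟩ <;>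
  rcases pvFindFacts cs "\n### Attachments:".toList (by decide) with ⟨h2e, h2n⟩ | ⟨h2a, h2b, h2p, h2m⟩ <;>
  split_ifs with hA hB hC
  all_goals try (exfalso; omega)
  -- none/none, both ifs false: cutoff is the length
  · rw [pvIdx_eq_len cs (fun j ho => ho.elim (h1n j) (h2n j))]
  -- p1 absent, p2 found
  · rw [pvIdx_eq_of_first cs (PySem.Chars.find cs "\n### Attachments:".toList).toNat
      (Or.inr h2p) (fun j hj ho => ho.elim (h1n j) (h2m j hj))]
    omega
  -- p1 found, p2 absent
  · rw [pvIdx_eq_of_first cs (PySem.Chars.find cs "\n## Attachments:".toList).toNat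
      (Or.inl h1p) (fun j hj ho => ho.elim (h1m j hj) (h2n j))]
    omega
  -- both found, p2 first
  · rw [pvIdx_eq_of_first cs (PySem.Chars.find cs "\n### Attachments:".toList).toNat
      (Or.inr h2p) (fun j hj ho => ho.elim (h1m j (by omega)) (h2m j hj))]
    omega
  -- both found, p1 first
  · rw [pvIdx_eq_of_first cs (PySem.Chars.find cs "\n## Attachments:".toList).toNat
      (Or.inl h1p) (fun j hj ho => ho.elim (h1m j hj) (h2m j (by omega)))]
    omega

def pvHdr (l : List Char) : Bool :=
  PySem.Chars.startswith l "## Attachments:".toList || PySem.Chars.startswith l "### Attachments:".toList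

theorem pvHdr_eq_false_iff (l : List Char) :
    pvHdr l = false ↔ ¬("## Attachments:".toList <+: l ∨ "### Attachments:".toList <+: l) := by
  simp only [pvHdr, Bool.or_eq_false_iff, not_or, ← PySem.Chars.startswith_iff]
  simp

theorem pvSplitAtNl (cs : List Char) (h : '\n' ∈ cs) :
    ∃ l0 rest, cs = l0 ++ '\n' :: rest ∧ '\n' ∉ l0 := by
  induction cs with
  | nil => simp at h
  | cons c cs' ih =>
    by_cases hc : c = '\n'
    · exact ⟨[], cs', by simp [hc], by simp⟩
    · obtain ⟨l0, r, hr, hn⟩ := ih (by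
        rcases List.mem_cons.mp h with h | h
        · exact absurd h.symm hc
        · exact h)
      exact ⟨c :: l0, r, by simp [hr], by simp [hn, Ne.symm hc]⟩

theorem pvNoOcc_in_l0 (l0 rest : List Char) (h0 : '\n' ∉ l0) (j : Nat) (hj : j < l0.length) :
    ¬ pvOcc (l0 ++ '\n' :: rest) j := by
  intro ho
  have hd : (l0 ++ '\n' :: rest).drop j = l0.drop j ++ '\n' :: rest :=
    List.drop_append_of_le_length (by omega)
  have hne : l0.drop j ≠ [] := by
    intro hnil
    have := congrArg List.length hnil
    simp at this
    omega
  obtain ⟨d, t, hdt⟩ := List.exists_cons_of_ne_nil hne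
  have hdmem : d ∈ l0 := List.mem_of_mem_drop (hdt ▸ List.mem_cons_self)
  have hdne : d ≠ '\n' := fun he => h0 (he ▸ hdmem)
  have e1 : "\n## Attachments:".toList = '\n' :: "## Attachments:".toList := by decide
  have e2 : "\n### Attachments:".toList = '\n' :: "### Attachments:".toList := by decide
  rcases ho with ho | ho
  · rw [hd, hdt, List.cons_append, e1, List.cons_prefix_cons] at ho
    exact hdne ho.1.symm
  · rw [hd, hdt, List.cons_append, e2, List.cons_prefix_cons] at ho
    exact hdne ho.1.symm

theorem pvOcc_at_len (l0 rest : List Char) :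
    pvOcc (l0 ++ '\n' :: rest) l0.length ↔
      ("## Attachments:".toList <+: rest ∨ "### Attachments:".toList <+: rest) := by
  have hd : (l0 ++ '\n' :: rest).drop l0.length = '\n' :: rest := by
    simp
  have e1 : "\n## Attachments:".toList = '\n' :: "## Attachments:".toList := by decide
  have e2 : "\n### Attachments:".toList = '\n' :: "### Attachments:".toList := by decide
  rw [pvOcc, hd, e1, e2, List.cons_prefix_cons, List.cons_prefix_cons]
  simp

theorem pvOcc_shift (l0 rest : List Char) (j : Nat) :
    pvOcc (l0 ++ '\n' :: rest) (l0.length + 1 + j) ↔ pvOcc rest j := by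
  have hd : (l0 ++ '\n' :: rest).drop (l0.length + 1 + j) = rest.drop j := by
    rw [show l0.length + 1 + j = l0.length + (1 + j) by omega]
    rw [List.drop_append]
    simp [List.drop_succ_cons, Nat.add_comm 1 j]
  rw [pvOcc, hd]
  rfl

theorem pvSw_append (H l0 rest : List Char) (hH : '\n' ∉ H) (h0 : '\n' ∉ l0) :
    PySem.Chars.startswith (l0 ++ '\n' :: rest) H = PySem.Chars.startswith l0 H := by
  rw [Bool.eq_iff_iff, PySem.Chars.startswith_iff, PySem.Chars.startswith_iff]
  exact pvPrefix_append_nl H l0 rest hH h0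

theorem pvHdr_append (l0 rest : List Char) (h0 : '\n' ∉ l0) :
    pvHdr (l0 ++ '\n' :: rest) = pvHdr l0 := by
  unfold pvHdr
  rw [pvSw_append _ _ _ (by decide) h0, pvSw_append _ _ _ (by decide) h0]

theorem pvSw_firstLine (H cs : List Char) (hH : '\n' ∉ H) :
    PySem.Chars.startswith (cs.takeWhile (fun c => !(c = '\n' : Bool))) H
      = PySem.Chars.startswith cs H := by
  rw [Bool.eq_iff_iff, PySem.Chars.startswith_iff, PySem.Chars.startswith_iff]
  exact (pvPrefix_takeWhile H hH cs).symm

theorem pvHdr_firstLine (cs : List Char) :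
    pvHdr (cs.takeWhile (fun c => !(c = '\n' : Bool))) = pvHdr cs := by
  unfold pvHdr
  rw [pvSw_firstLine _ _ (by decide), pvSw_firstLine _ _ (by decide)]

theorem pvMainAux (n : Nat) : ∀ cs : List Char, cs.length ≤ n → pvHdr cs = false →
    pvSplitNl (cs.take (pvIdx cs)) = (pvSplitNl cs).takeWhile (fun l => !pvHdr l) := by
  induction n with
  | zero =>
    intro cs hlen hh
    have : cs = [] := List.eq_nil_of_length_eq_zero (by omega)
    subst this
    simp [pvIdx, pvSplitNl, hh]
  | succ n ih =>
    intro cs hlen hh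
    by_cases hnl : '\n' ∈ cs
    · obtain ⟨l0, rest, hcs, h0⟩ := pvSplitAtNl cs hnl
      subst hcs
      have hhl0 : pvHdr l0 = false := by rw [← pvHdr_append l0 rest h0]; exact hh
      by_cases hrest : ("## Attachments:".toList <+: rest ∨ "### Attachments:".toList <+: rest)
      · -- header right after this newline: cut exactly here
        have hidx : pvIdx (l0 ++ '\n' :: rest) = l0.length :=
          pvIdx_eq_of_first _ _ ((pvOcc_at_len l0 rest).mpr hrest)
            (fun j hj => pvNoOcc_in_l0 l0 rest h0 j hj)
        rw [hidx, List.take_left, pvSplitNl_no_nl l0 h0, pvSplitNl_append l0 rest h0,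
          List.takeWhile_cons]
        rw [if_pos (by simp [hhl0])]
        obtain ⟨t, ht⟩ := pvSplitNl_head rest
        rw [ht, List.takeWhile_cons]
        have : pvHdr (rest.takeWhile (fun c => !(c = '\n' : Bool))) = true := by
          rw [pvHdr_firstLine]
          unfold pvHdr
          rcases hrest with hr | hr
          · have hsw : PySem.Chars.startswith rest "## Attachments:".toList = true := by
              rw [PySem.Chars.startswith_iff]; exact hr
            rw [hsw]; rfl
          · have hsw : PySem.Chars.startswith rest "### Attachments:".toList = true := by
              rw [PySem.Chars.startswith_iff]; exact hr
            rw [hsw]; simp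
        rw [if_neg (by simp [this])]
      · -- no header after this newline: keep the line, recurse
        have hhrest : pvHdr rest = false := (pvHdr_eq_false_iff rest).mpr hrest
        have hidx : pvIdx (l0 ++ '\n' :: rest) = l0.length + 1 + pvIdx rest := by
          rcases pvIdx_occ rest with hlenr | hocc
          · have hnone : ∀ j, ¬ pvOcc (l0 ++ '\n' :: rest) j := by
              intro j ho
              rcases Nat.lt_trichotomy j l0.length with hj | hj | hj
              · exact pvNoOcc_in_l0 l0 rest h0 j hj ho
              · subst hj; exact hrest ((pvOcc_at_len l0 rest).mp ho)
              · have hj' : j = l0.length + 1 + (j - l0.length - 1) := by omega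
                rw [hj', pvOcc_shift] at ho
                exact pvIdx_min rest _ (by have := pvOcc_lt rest _ ho; omega) ho
            rw [pvIdx_eq_len _ hnone, hlenr]
            simp
            omega
          · apply pvIdx_eq_of_first
            · rw [pvOcc_shift]; exact hocc
            · intro j hj ho
              rcases Nat.lt_trichotomy j l0.length with hj2 | hj2 | hj2
              · exact pvNoOcc_in_l0 l0 rest h0 j hj2 ho
              · subst hj2; exact hrest ((pvOcc_at_len l0 rest).mp ho)
              · have hj' : j = l0.length + 1 + (j - l0.length - 1) := by omega
                rw [hj', pvOcc_shift] at ho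
                exact pvIdx_min rest _ (by omega) ho
        have htake : (l0 ++ '\n' :: rest).take (l0.length + 1 + pvIdx rest)
            = l0 ++ '\n' :: rest.take (pvIdx rest) := by
          rw [show l0.length + 1 + pvIdx rest = l0.length + (pvIdx rest + 1) by omega,
            List.take_append]
          congr 1
          · exact List.take_of_length_le (by omega)
          · rw [show l0.length + (pvIdx rest + 1) - l0.length = pvIdx rest + 1 by omega,
              List.take_succ_cons]
        rw [hidx, htake, pvSplitNl_append l0 _ h0, pvSplitNl_append l0 rest h0,
          List.takeWhile_cons]
        rw [if_pos (by simp [hhl0])]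
        rw [ih rest (by simp at hlen; omega) hhrest]
    · have hidx : pvIdx cs = cs.length := pvIdx_eq_len cs (pvNoNl_no_occ cs hnl)
      rw [hidx, List.take_length, pvSplitNl_no_nl cs hnl]
      simp [List.takeWhile_cons, hh]

theorem pvMain (cs : List Char) (h : pvHdr cs = false) :
    pvSplitNl (cs.take (pvIdx cs)) = (pvSplitNl cs).takeWhile (fun l => !pvHdr l) :=
  pvMainAux cs.length cs le_rfl h

theorem pvGoA_eq_takeWhile_filter (ls : List String) :
    pvGoA ls =
      (ls.takeWhile (fun line =>
        !(PySem.Str.startswith line "## Attachments:" || PySem.Str.startswith line "### Attachments:"))).filter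
        (fun line => !pvSubs.any (fun sub => PySem.Str.isIn sub line)) := by
  induction ls with
  | nil => rfl
  | cons line rest ih =>
    simp only [pvGoA, List.takeWhile_cons]
    cases hq : (PySem.Str.startswith line "## Attachments:" || PySem.Str.startswith line "### Attachments:") with
    | true =>
      simp only [Bool.not_true, Bool.false_eq_true, if_false, if_true, List.filter_nil]
    | false =>
      simp only [Bool.not_false, Bool.false_eq_true, if_false, if_true,
        List.filter_cons, pvSubs, List.any_cons, List.any_nil, Bool.or_false]
      cases h1 : PySem.Str.isIn "![](attachments/thumbnails/1146972/1147367)" line <;>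
      cases h2 : PySem.Str.isIn "![](attachments/thumbnails/1146972/1147365)" line <;>
      cases h3 : PySem.Str.isIn "![](attachments/1146972/1147367.png)" line <;>
      cases h4 : PySem.Str.isIn "![](attachments/1146972/1147365.png)" line <;>
      cases h5 : PySem.Str.isIn "![](plugins/servlet/confluence/placeholder/unknown-attachment)" line <;>
      simp only [h1, h2, h3, h4, h5, Bool.true_or, Bool.false_or, Bool.or_true, Bool.or_false,
        Bool.not_true, Bool.not_false, Bool.false_eq_true, if_false, if_true, ih,
        pvSubs, List.any_cons, List.any_nil]

theorem pvSplitLines (l : List Char) :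
    (PySem.Str.split? (String.ofList l) "\n").getD [] = (pvSplitNl l).map String.ofList := by
  simp [PySem.Str.split?, PySem.Chars.split?, pvSplitOn_eq]

theorem pvQComp :
    ((fun line => !(PySem.Str.startswith line "## Attachments:" || PySem.Str.startswith line "### Attachments:"))
      ∘ String.ofList) = fun l : List Char => !pvHdr l := by
  funext l
  simp [pvHdr, Function.comp]

theorem pvKey (data : String) : remove_myCompany_staff data = remove_myCompany_staff_alt data := by
  simp only [remove_myCompany_staff, remove_myCompany_staff_alt]
  have hsplit0 : (PySem.Str.split? data "\n").getD [] = (pvSplitNl data.toList).map String.ofList := by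
    have := pvSplitLines data.toList
    simpa using this
  have hsw : (PySem.Str.startswith data "## Attachments:" || PySem.Str.startswith data "### Attachments:")
      = pvHdr data.toList := by
    simp [pvHdr]
  rw [pvGoA_eq_takeWhile_filter, hsplit0, hsw]
  by_cases hh : pvHdr data.toList = true
  · rw [if_pos hh]
    -- both sides are the empty string: the very first line is a header
    have hb : PySem.Str.slice data none (some 0) = "" := by
      simp [PySem.Str.slice, PySem.Chars.slice_eq_listSlice, PySem.List.slice_to]
    rw [hb]
    obtain ⟨t, ht⟩ := pvSplitNl_head data.toList
    rw [ht]
    simp only [List.map_cons, List.takeWhile_cons]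
    have hq : pvHdr (data.toList.takeWhile (fun c => !(c = '\n' : Bool))) = true := by
      rw [pvHdr_firstLine]; exact hh
    have hcond : (PySem.Str.startswith
          (String.ofList (data.toList.takeWhile (fun c => !(c = '\n' : Bool)))) "## Attachments:"
        || PySem.Str.startswith
          (String.ofList (data.toList.takeWhile (fun c => !(c = '\n' : Bool)))) "### Attachments:") = true := by
      simpa [pvHdr] using hq
    rw [hcond]
    simp only [Bool.not_true, Bool.false_eq_true, if_false]
    decide
  · rw [if_neg hh]
    simp only [List.foldl, PySem.Str.find_eq, PySem.Str.len_eq, ne_eq]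
    rw [pvCut_eq data.toList]
    have hslice : PySem.Str.slice data none (some ((pvIdx data.toList : Nat) : Int))
        = String.ofList (data.toList.take (pvIdx data.toList)) := by
      simp [PySem.Str.slice, PySem.Chars.slice_eq_listSlice, PySem.List.slice_to_natCast]
    rw [hslice, pvSplitLines, pvMain data.toList (by simpa using hh), List.takeWhile_map, pvQComp]

-- ===== VERDICT (by name: the statement is the Claim_ definition above) =====
theorem remove_myCompany_staff_spec : Claim_equal_remove_myCompany_staff := by
  intro data _
  unfold Spec_remove_myCompany_staff
  exact pvKey data
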